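-- pv_equiv track=rewrite | github.com/life-is-awesome/algorithm-study | array/questions/skill-trees-2.py | solution
-- ===== SOURCE A (Python) =====
-- def solution(skill, skill_trees):
--     answer = 0
--
--     # 선행 트리 체커를 생성한다. - O(n)|n = len(skill)
--     skill_checker = set(skill)
--
--     # 모든 스킬 트리를 순회하면서
--     for skill_tree in skill_trees:
--         # 선행 스킬이 아닌거는 걸러내고
--         req_skills = ''.join(\
--                 filter(lambda x: x in skill_checker, skill_tree))
--         # 걸러낸 스킬이 선행 스킬에 반하지 않으면 ++
--         if req_skills == skill[:len(req_skills)]: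
--             answer += 1
--     # 위 반복문의 시간 복잡도는
--     # O(nm)|n=len(skill_trees), m=[각 skill_tree 의 평균 문자 개수]
--     return answer
-- ===== SOURCE B (Python) =====
-- def solution(skill, skill_trees):
--     # Compile skill into a sparse DFA: states 0..len(skill) plus a dead state
--     # -1.  The only explicit transitions are the advances (i, skill[i]) -> i+1;
--     # on a missing (state, char) key a character of skill kills the run, while
--     # any other character leaves the state unchanged (so -1 absorbs everything).
--     advance = {(i, c): i + 1 for i, c in enumerate(skill)}
--     required = set(skill)
--     count = 0
--     for tree in skill_trees:
--         state = 0
--         for c in tree: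
--             state = advance.get((state, c), -1 if c in required else state)
--         count += state != -1
--     return count
-- ===== Notes on version B (the rewrite author's own statement) =====
-- stated objective: alternative
-- what changed: B compiles skill once into a sparse DFA: an advance-transition dictionary {(i, skill[i]): i+1} over states 0..len(skill) plus a dead state -1, and runs every tree through the automaton with one table lookup per character, instead of A's per-tree filter-join of skill characters followed by a slice comparison against a prefix of skill.
import Mathlib
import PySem

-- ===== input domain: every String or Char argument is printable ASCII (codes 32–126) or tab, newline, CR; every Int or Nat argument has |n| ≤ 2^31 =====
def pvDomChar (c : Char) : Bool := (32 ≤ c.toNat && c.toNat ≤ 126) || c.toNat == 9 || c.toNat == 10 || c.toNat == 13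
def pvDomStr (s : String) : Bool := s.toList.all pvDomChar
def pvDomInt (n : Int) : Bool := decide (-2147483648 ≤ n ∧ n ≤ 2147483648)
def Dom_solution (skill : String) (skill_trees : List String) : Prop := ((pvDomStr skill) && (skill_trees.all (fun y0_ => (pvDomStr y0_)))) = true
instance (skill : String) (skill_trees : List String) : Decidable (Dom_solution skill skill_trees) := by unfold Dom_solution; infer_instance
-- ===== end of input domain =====

-- B compiles skill once into a sparse DFA transition dictionary and runs each tree through the
-- automaton by table lookup, instead of A's per-tree filter-join + prefix-slice comparison
-- (alternative algorithm, same cost class).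

-- ===== PORT A =====
def solution (skill : String) (skill_trees : List String) : Int :=
  let skill_checker : PySem.Set Char := PySem.Set.ofList skill.toList
  skill_trees.foldl (fun answer skill_tree =>
    let req_skills : List Char :=
      skill_tree.toList.filter (fun x => PySem.Set.contains skill_checker x)
    if req_skills = PySem.List.slice skill.toList none (some (req_skills.length : Int))
    then answer + 1 else answer) 0

-- ===== PORT B =====
def solution_alt (skill : String) (skill_trees : List String) : Int :=
  let s := skill.toList
  -- Source B's dict comprehension over enumerate(skill): the explicit advance transitions
  let advance : PySem.Dict (Int × Char) Int :=
    (PySem.List.enumerate s).foldl (fun d p => d.insert p (p.1 + 1)) PySem.Dict.empty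
  let required : PySem.Set Char := PySem.Set.ofList s
  skill_trees.foldl (fun count tree =>
    let st := tree.toList.foldl (fun st c =>
      advance.getD (st, c) (if PySem.Set.contains required c then -1 else st)) 0
    count + (if st ≠ -1 then 1 else 0)) 0

-- ===== PRECONDITION & SPEC =====
def Spec_solution (skill : String) (skill_trees : List String) (out : Int) : Prop := out = solution_alt skill skill_trees
instance (skill : String) (skill_trees : List String) (out : Int) : Decidable (Spec_solution skill skill_trees out) := by unfold Spec_solution; infer_instance

-- ===== CLAIM (what is proved, stated in full; the proofs are below) =====
def Claim_equal_solution : Prop := ∀ (skill : String) (skill_trees : List String), Dom_solution skill skill_trees → Spec_solution skill skill_trees (solution skill skill_trees)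

-- ===== LEMMAS AND PROOFS =====

-- a fold of inserts whose value depends only on the key is lookup-by-membership
theorem pvGetD_foldl_insert_fn (f : Int × Char → Int) (ks : List (Int × Char))
    (d0 : PySem.Dict (Int × Char) Int) (k : Int × Char) (dflt : Int) :
    (ks.foldl (fun d p => d.insert p (f p)) d0).getD k dflt
      = if k ∈ ks then f k else d0.getD k dflt := by
  induction ks generalizing d0 with
  | nil => simp
  | cons a ks ih =>
    rw [List.foldl_cons, ih]
    by_cases h : k ∈ ks
    · simp [h]
    · rw [if_neg h, PySem.Dict.getD_insert]
      by_cases hk : k = a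
      · simp [hk]
      · simp [hk, h]

-- B's transition function, characterised
theorem pvStep_eq (s : List Char) (st : Int) (c : Char) :
    ((PySem.List.enumerate s).foldl (fun d p => d.insert p (p.1 + 1)) PySem.Dict.empty).getD (st, c)
        (if PySem.Set.contains (PySem.Set.ofList s) c then -1 else st)
    = if (st, c) ∈ PySem.List.enumerate s then st + 1
      else if c ∈ s then -1 else st := by
  have hreq : PySem.Set.contains (PySem.Set.ofList s) c = decide (c ∈ s) := by
    by_cases hx : c ∈ s
    · simp [PySem.Set.mem_ofList, hx]
    · simp [PySem.Set.mem_ofList, hx]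
  rw [pvGetD_foldl_insert_fn (fun p => p.1 + 1)]
  by_cases hm : (st, c) ∈ PySem.List.enumerate s
  · rw [if_pos hm, if_pos hm]
  · rw [if_neg hm, if_neg hm, PySem.Dict.getD_empty, hreq]
    by_cases hx : c ∈ s
    · simp [hx]
    · simp [hx]

-- the dead state absorbs
theorem pvRun_dead (s : List Char) (t : List Char) :
    t.foldl (fun st c =>
      ((PySem.List.enumerate s).foldl (fun d p => d.insert p (p.1 + 1)) PySem.Dict.empty).getD (st, c)
        (if PySem.Set.contains (PySem.Set.ofList s) c then -1 else st)) (-1) = -1 := by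
  induction t with
  | nil => rfl
  | cons c rest ih =>
    rw [List.foldl_cons, pvStep_eq]
    have hm : ((-1 : Int), c) ∉ PySem.List.enumerate s := by
      intro hmem
      rcases (PySem.List.mem_enumerate_iff _ _ _).mp hmem with ⟨k, hk, heq⟩
      have : (-1 : Int) = 0 + (k : Int) := congrArg Prod.fst heq
      omega
    rw [if_neg hm]
    have : (if c ∈ s then (-1 : Int) else -1) = -1 := by split <;> rfl
    rw [this, ih]

-- the DFA run survives from state i iff the filtered tree equals the matching slice of skill
theorem pvRun_iff (s : List Char) (t : List Char) (i : Nat) (h : i ≤ s.length) :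
    (t.foldl (fun st c =>
      ((PySem.List.enumerate s).foldl (fun d p => d.insert p (p.1 + 1)) PySem.Dict.empty).getD (st, c)
        (if PySem.Set.contains (PySem.Set.ofList s) c then -1 else st)) (i : Int) ≠ -1)
    ↔ t.filter (fun x => decide (x ∈ s)) =
        (s.drop i).take (t.filter (fun x => decide (x ∈ s))).length := by
  induction t generalizing i with
  | nil => simp
  | cons c rest ih =>
    rw [List.foldl_cons, pvStep_eq]
    by_cases hm : ((i : Int), c) ∈ PySem.List.enumerate s
    · -- an explicit advance: i < len, s[i] = c (and so c ∈ s)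
      rcases (PySem.List.mem_enumerate_iff _ _ _).mp hm with ⟨k, hk, heq⟩
      have hik : (i : Int) = 0 + (k : Int) := congrArg Prod.fst heq
      have hki : k = i := by omega
      subst hki
      have hch : s[k] = c := (congrArg Prod.snd heq).symm
      have hc : c ∈ s := hch ▸ List.getElem_mem hk
      rw [if_pos hm]
      have hfilter : (c :: rest).filter (fun x => decide (x ∈ s)) =
          c :: rest.filter (fun x => decide (x ∈ s)) := by simp [hc]
      have hcast : (k : Int) + 1 = ((k + 1 : Nat) : Int) := by push_cast; ring
      rw [hfilter, hcast, ih (k + 1) hk, List.drop_eq_getElem_cons hk, hch]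
      simp
    · rw [if_neg hm]
      by_cases hc : c ∈ s
      · -- a skill character out of order (or past the end): the run dies
        rw [if_pos hc]
        have hfilter : (c :: rest).filter (fun x => decide (x ∈ s)) =
            c :: rest.filter (fun x => decide (x ∈ s)) := by simp [hc]
        rw [hfilter]
        simp only [pvRun_dead, ne_eq, not_true_eq_false, false_iff]
        by_cases hidx : i = s.length
        · subst hidx
          simp
        · have hlt : i < s.length := lt_of_le_of_ne h hidx
          rw [List.drop_eq_getElem_cons hlt]
          simp only [List.length_cons, List.take_succ_cons]
          intro heq
          have : s[i] = c := (List.cons_eq_cons.mp heq).1.symm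
          exact hm ((PySem.List.mem_enumerate_iff _ _ _).mpr ⟨i, hlt, by simp [this]⟩)
      · -- not a skill character: ignored
        rw [if_neg hc, ih i h]
        simp [hc]

-- A's per-tree test equals B's per-tree DFA test
theorem per_tree_eq (s t : List Char) :
    (t.filter (fun x => PySem.Set.contains (PySem.Set.ofList s) x) =
        PySem.List.slice s none
          (some ((t.filter (fun x => PySem.Set.contains (PySem.Set.ofList s) x)).length : Int)))
      ↔ (t.foldl (fun st c =>
          ((PySem.List.enumerate s).foldl (fun d p => d.insert p (p.1 + 1)) PySem.Dict.empty).getD (st, c)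
            (if PySem.Set.contains (PySem.Set.ofList s) c then -1 else st)) 0 ≠ -1) := by
  have hfun : (fun x => PySem.Set.contains (PySem.Set.ofList s) x) =
      (fun x => decide (x ∈ s)) := by
    funext x
    by_cases hx : x ∈ s
    · simp [PySem.Set.mem_ofList, hx]
    · simp [PySem.Set.mem_ofList, hx]
  rw [hfun, PySem.List.slice_to_natCast]
  have := pvRun_iff s t 0 (Nat.zero_le _)
  simp only [Nat.cast_zero, List.drop_zero] at this
  rw [← this]

-- ===== VERDICT (by name: the statement is the Claim_ definition above) =====
theorem solution_spec : Claim_equal_solution := by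
  intro skill skill_trees hd
  clear hd
  unfold Spec_solution solution solution_alt
  induction skill_trees using List.reverseRecOn with
  | nil => rfl
  | append_singleton ts t ih =>
    simp only [List.foldl_append, List.foldl_cons, List.foldl_nil] at *
    rw [ih]
    by_cases hm : (t.toList.foldl (fun st c =>
          ((PySem.List.enumerate skill.toList).foldl (fun d p => d.insert p (p.1 + 1)) PySem.Dict.empty).getD (st, c)
            (if PySem.Set.contains (PySem.Set.ofList skill.toList) c then -1 else st)) 0 ≠ -1)
    · rw [if_pos ((per_tree_eq _ _).mpr hm), if_pos hm]
    · rw [if_neg hm, if_neg (fun hA => hm ((per_tree_eq _ _).mp hA))]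
      ring
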